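-- pv_equiv track=rewrite | github.com/maykim51/leetcode | kakao_mock_200328/review_05.py | solution
-- ===== SOURCE A (Python) =====
-- def check(stones,k,n):
--     temp = k
--     for stone in stones:
--         if stone < n:
--             temp -= 1
--         else:
--             temp = k
--
--         if temp == 0:
--             return False
--     return True
--
-- def solution(stones, k):
--     l = 0
--     r = 200000000
--     while l<r-1:
--         n = (l+r)//2
--         canJump = check(stones,k,n)
--
--         if canJump:
--             l = n
--         else:
--             r = n
--
--     rok = check(stones,k,r)
--     if rok:
--         return r
--     else:
--         return l
-- ===== SOURCE B (Python) =====
-- def solution(stones, k):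
--     LIMIT = 200000000
--     n = len(stones)
--     if k > n:
--         return LIMIT
--     q = []        # candidate indices; stones values strictly decreasing
--     head = 0      # q[head:] are the live candidates of the current window
--     best = None   # min over complete windows of the window maximum
--     for i in range(n):
--         s = stones[i]
--         while len(q) > head and stones[q[-1]] <= s:
--             q.pop()
--         q.append(i)
--         if q[head] <= i - k:
--             head += 1
--         if i >= k - 1:
--             m = stones[q[head]]
--             if best is None or m < best:
--                 best = m
--     return max(0, min(best, LIMIT))
-- ===== Notes on version B (the rewrite author's own statement) =====
-- stated objective: faster
-- what changed: Replaces A's binary search over the answer range (each probe re-scanning the stones with a countdown of consecutive below-threshold stones) by a single left-to-right pass that maintains a monotonic deque of candidate indices, takes each size-k window's maximum from the deque front, and returns the minimum of those maxima clamped to [0, 200000000].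
-- outside the precondition, e.g. on solution([5], 0): A returns 200000000, B raises IndexError; on solution([], 0): A returns 200000000, B raises TypeError
import Mathlib
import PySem

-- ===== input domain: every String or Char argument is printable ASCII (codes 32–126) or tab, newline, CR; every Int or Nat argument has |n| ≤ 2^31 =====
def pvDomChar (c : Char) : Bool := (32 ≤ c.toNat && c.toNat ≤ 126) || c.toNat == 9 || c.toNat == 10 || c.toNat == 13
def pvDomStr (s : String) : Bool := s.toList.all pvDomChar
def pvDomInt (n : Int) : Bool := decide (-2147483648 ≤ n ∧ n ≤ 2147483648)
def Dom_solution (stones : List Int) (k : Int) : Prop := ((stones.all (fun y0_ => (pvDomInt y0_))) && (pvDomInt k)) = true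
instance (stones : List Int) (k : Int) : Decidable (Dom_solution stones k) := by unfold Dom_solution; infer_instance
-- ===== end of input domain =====

-- B replaces A's answer-range binary search (each probe rescanning the stones) by one
-- monotonic-deque pass taking the minimum of the size-k window maxima (objective: faster).

-- ===== PORT A =====
-- check's loop: temp countdown, reset on a stone ≥ n
def checkGo (n k : Int) : List Int → Int → Bool
  | [], _ => true
  | s :: rest, temp =>
    let temp' := if s < n then temp - 1 else k
    if temp' = 0 then false else checkGo n k rest temp'

def check (stones : List Int) (k n : Int) : Bool := checkGo n k stones k

-- the 'while l < r-1' loop of solution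
def bsLoop (stones : List Int) (k : Int) (l r : Int) : Int × Int :=
  if l < r - 1 then
    let n := PySem.Int.floordiv (l + r) 2
    if check stones k n then bsLoop stones k n r else bsLoop stones k l n
  else (l, r)
termination_by (r - l).toNat
decreasing_by
  · have h1 : l + 1 ≤ PySem.Int.floordiv (l + r) 2 :=
      (PySem.Int.le_floordiv_iff_mul_le (by omega)).2 (by omega)
    omega
  · have h2 : PySem.Int.floordiv (l + r) 2 < r :=
      (PySem.Int.floordiv_lt_iff_lt_mul (by omega)).2 (by omega)
    have h1 : l + 1 ≤ PySem.Int.floordiv (l + r) 2 :=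
      (PySem.Int.le_floordiv_iff_mul_le (by omega)).2 (by omega)
    omega

def solution (stones : List Int) (k : Int) : Int :=
  let p := bsLoop stones k 0 200000000
  if check stones k p.2 then p.2 else p.1

-- ===== PORT B =====
-- the 'while len(q) > head and stones[q[-1]] <= s: q.pop()' loop; the '0 ≤ head' conjunct
-- only makes the recursion total (head is always ≥ 0 when called; Python needs no such guard),
-- and pyGetD's default is never used (indices in q are always in range).
def popLoop (stones : List Int) (s : Int) (head : Int) (q : List Int) : List Int :=
  if h : 0 ≤ head ∧ head < (q.length : Int) ∧
      PySem.List.pyGetD stones (PySem.List.pyGetD q (-1) 0) 0 ≤ s then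
    popLoop stones s head q.dropLast
  else q
termination_by q.length
decreasing_by
  have hq : q ≠ [] := by rintro rfl; simp at h; omega
  have h1 : q.dropLast.length = q.length - 1 := List.length_dropLast
  have h2 : 0 < q.length := List.length_pos_iff.2 hq
  omega

-- one iteration of the 'for i in range(n)' loop; state = (q, head, best)
def dqStep (stones : List Int) (k : Int) (st : List Int × Int × Option Int) (i : Int) :
    List Int × Int × Option Int :=
  let s := PySem.List.pyGetD stones i 0
  let q := popLoop stones s st.2.1 st.1 ++ [i]
  let head := if PySem.List.pyGetD q st.2.1 0 ≤ i - k then st.2.1 + 1 else st.2.1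
  let best :=
    if k - 1 ≤ i then
      let m := PySem.List.pyGetD stones (PySem.List.pyGetD q head 0) 0
      match st.2.2 with
      | none => some m
      | some b => if m < b then some m else some b
    else st.2.2
  (q, head, best)

def solution_alt (stones : List Int) (k : Int) : Int :=
  if k > (stones.length : Int) then 200000000
  else
    let st := (PySem.List.pyRange 0 (stones.length : Int) 1).foldl (dqStep stones k) ([], 0, none)
    max 0 (min (st.2.2.getD 0) 200000000)

-- ===== PRECONDITION & SPEC =====
-- Pre_ restricts to the problem's natural domain k ≥ 1 (a positive window length): for k ≤ 0
-- B's deque pass raises (IndexError/TypeError), while A still returns 0 or 200000000 depending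
-- on the bisection path, the probed predicate being no longer monotone there.
def Pre_solution (stones : List Int) (k : Int) : Prop := 1 ≤ k
instance (stones : List Int) (k : Int) : Decidable (Pre_solution stones k) := by
  unfold Pre_solution; infer_instance
def pvWitness_solution : List Int × Int := ([2, 5, 1], 2)

def Spec_solution (stones : List Int) (k : Int) (out : Int) : Prop := out = solution_alt stones k
instance (stones : List Int) (k : Int) (out : Int) : Decidable (Spec_solution stones k out) := by
  unfold Spec_solution; infer_instance

-- ===== CLAIM (what is proved, stated in full; the proofs are below) =====
def Claim_equal_solution : Prop := ∀ (stones : List Int) (k : Int), Dom_solution stones k →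
  Pre_solution stones k → Spec_solution stones k (solution stones k)

-- ===== LEMMAS AND PROOFS =====

-- value of stones at a Nat index (0 outside; every use below is in range)
def pvVal (stones : List Int) (j : Nat) : Int := stones.getD j 0

-- maximum of a list (0 on [], never used there)
def pvMaxL : List Int → Int
  | [] => 0
  | [x] => x
  | x :: y :: l => max x (pvMaxL (y :: l))

-- maximum of the window [j, j+K)
def pvW (stones : List Int) (K j : Nat) : Int :=
  pvMaxL ((List.range' j K).map (pvVal stones))

-- running minimum of the window maxima over windows 0..t
def pvBmin (stones : List Int) (K : Nat) : Nat → Int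
  | 0 => pvW stones K 0
  | t + 1 => min (pvBmin stones K t) (pvW stones K (t + 1))

theorem le_pvMaxL (l : List Int) (x : Int) (hx : x ∈ l) : x ≤ pvMaxL l := by
  induction l with
  | nil => simp at hx
  | cons a t ih =>
    rcases t with _ | ⟨b, t'⟩
    · simp at hx; simp [pvMaxL, hx]
    · rcases List.mem_cons.1 hx with rfl | hx'
      · exact le_max_left _ _
      · exact le_trans (ih hx') (le_max_right _ _)

theorem pvMaxL_mem (l : List Int) (hl : l ≠ []) : pvMaxL l ∈ l := by
  induction l with
  | nil => simp at hl
  | cons a t ih =>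
    rcases t with _ | ⟨b, t'⟩
    · simp [pvMaxL]
    · rcases max_cases a (pvMaxL (b :: t')) with ⟨h, _⟩ | ⟨h, _⟩
      · simp [pvMaxL, h]
      · have := ih (by simp)
        simp only [pvMaxL, h]
        exact List.mem_cons_of_mem _ this

theorem le_pvMaxL_iff (l : List Int) (hl : l ≠ []) (t : Int) :
    t ≤ pvMaxL l ↔ ∃ x ∈ l, t ≤ x := by
  constructor
  · intro h; exact ⟨pvMaxL l, pvMaxL_mem l hl, h⟩
  · rintro ⟨x, hx, hxt⟩; exact le_trans hxt (le_pvMaxL l x hx)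

theorem pvMaxL_cons_of_le (l : List Int) (x : Int) (h : ∀ y ∈ l, y ≤ x) :
    pvMaxL (x :: l) = x := by
  rcases l with _ | ⟨b, t⟩
  · rfl
  · have h1 : pvMaxL (b :: t) ≤ x := h _ (pvMaxL_mem _ (by simp))
    simp [pvMaxL, max_eq_left h1]

theorem pvMaxL_cons_of_mem (l : List Int) (x y : Int) (hy : y ∈ l) (hxy : x ≤ y) :
    pvMaxL (x :: l) = pvMaxL l := by
  rcases l with _ | ⟨b, t⟩
  · simp at hy
  · have h1 : x ≤ pvMaxL (b :: t) := le_trans hxy (le_pvMaxL _ _ hy)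
    simp [pvMaxL, max_eq_right h1]

theorem window_eq (stones : List Int) :
    ∀ (m j : Nat), j + m ≤ stones.length →
      (stones.drop j).take m = (List.range' j m).map (pvVal stones) := by
  intro m
  induction m with
  | zero => intro j _; simp
  | succ m ih =>
    intro j hj
    have hjl : j < stones.length := by omega
    rw [List.drop_eq_getElem_cons hjl, List.range'_succ, List.take_succ_cons, List.map_cons]
    congr 1
    · simp [pvVal, List.getD_eq_getElem?_getD, List.getElem?_eq_getElem hjl]
    · exact ih (j + 1) (by omega)

theorem checkGo_iff (nt k : Int) :
    ∀ (xs : List Int) (temp : Int), 1 ≤ temp → temp ≤ k →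
    (checkGo nt k xs temp = true ↔
      ¬ ((temp.toNat ≤ xs.length ∧ ∀ x ∈ xs.take temp.toNat, x < nt) ∨
         ∃ j : Nat, 1 ≤ j ∧ j + k.toNat ≤ xs.length ∧
           ∀ x ∈ (xs.drop j).take k.toNat, x < nt)) := by
  intro xs
  induction xs with
  | nil =>
    intro temp h1 _
    simp only [checkGo, List.length_nil, true_iff]
    rintro (⟨h, _⟩ | ⟨j, hj1, hj2, _⟩) <;> omega
  | cons s rest ih =>
    intro temp h1 h2
    have hk1 : 1 ≤ k := le_trans h1 h2
    simp only [checkGo]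
    by_cases hs : s < nt
    · simp only [if_pos hs]
      by_cases ht1 : temp = 1
      · subst ht1
        have h0 : (1 : Int) - 1 = 0 := by norm_num
        rw [h0, if_pos rfl]
        simp only [Bool.false_eq_true, false_iff, not_not]
        left
        have h11 : (1 : Int).toNat = 1 := rfl
        refine ⟨by rw [h11]; simp, ?_⟩
        intro x hx
        rw [h11, List.take_succ_cons, List.take_zero] at hx
        simp at hx; subst hx; exact hs
      · have htemp : temp - 1 ≠ 0 := by omega
        rw [if_neg htemp]
        rw [ih (temp - 1) (by omega) (by omega)]
        constructor
        · intro h hbad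
          apply h
          rcases hbad with ⟨hl, hall⟩ | ⟨j, hj1, hj2, hall⟩
          · left
            refine ⟨by simp at hl ⊢; omega, ?_⟩
            intro x hx
            apply hall
            have hts : temp.toNat = (temp - 1).toNat + 1 := by omega
            rw [hts, List.take_succ_cons]
            exact List.mem_cons_of_mem _ hx
          · obtain ⟨j', rfl⟩ : ∃ j', j = j' + 1 := ⟨j - 1, by omega⟩
            rcases Nat.eq_zero_or_pos j' with rfl | hj'
            · -- window at position 1 of (s :: rest) = take K rest; absorb into clause 1
              left
              simp only [List.drop_succ_cons, List.drop_zero] at hall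
              simp only [List.length_cons] at hj2
              refine ⟨by omega, ?_⟩
              intro x hx
              apply hall
              have h5 : (temp - 1).toNat ≤ k.toNat := by omega
              have : rest.take (temp - 1).toNat = (rest.take k.toNat).take (temp - 1).toNat := by
                rw [List.take_take, min_eq_left h5]
              rw [this] at hx
              exact List.take_subset _ _ hx
            · right
              exact ⟨j', hj', by simp at hj2 ⊢; omega, by
                simpa [List.drop_succ_cons] using hall⟩
        · intro h hbad
          apply h
          rcases hbad with ⟨hl, hall⟩ | ⟨j, hj1, hj2, hall⟩
          · left
            have hts : temp.toNat = (temp - 1).toNat + 1 := by omega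
            refine ⟨by simp; omega, ?_⟩
            intro x hx
            rw [hts, List.take_succ_cons] at hx
            rcases List.mem_cons.1 hx with rfl | hx'
            · exact hs
            · exact hall x hx'
          · right
            exact ⟨j + 1, by omega, by simp; omega, by
              simpa [List.drop_succ_cons] using hall⟩
    · simp only [if_neg hs]
      have hkne : k ≠ 0 := by omega
      rw [if_neg hkne]
      rw [ih k hk1 le_rfl]
      constructor
      · intro h hbad
        apply h
        rcases hbad with ⟨hl, hall⟩ | ⟨j, hj1, hj2, hall⟩
        · -- clause 1 of (s :: rest) is impossible: s itself is ≥ nt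
          exfalso
          apply hs
          apply hall
          have hts : temp.toNat = (temp.toNat - 1) + 1 := by omega
          rw [hts, List.take_succ_cons]
          exact List.mem_cons_self
        · obtain ⟨j', rfl⟩ : ∃ j', j = j' + 1 := ⟨j - 1, by omega⟩
          rcases Nat.eq_zero_or_pos j' with rfl | hj'
          · left
            simp only [List.drop_succ_cons, List.drop_zero] at hall
            simp only [List.length_cons] at hj2
            exact ⟨by omega, hall⟩
          · right
            exact ⟨j', hj', by simp at hj2 ⊢; omega, by
              simpa [List.drop_succ_cons] using hall⟩
      · intro h hbad
        apply h
        rcases hbad with ⟨hl, hall⟩ | ⟨j, hj1, hj2, hall⟩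
        · right
          exact ⟨1, le_rfl, by simp; omega, by simpa using hall⟩
        · right
          exact ⟨j + 1, by omega, by simp; omega, by
            simpa [List.drop_succ_cons] using hall⟩

theorem check_char (stones : List Int) (k t : Int) (hk : 1 ≤ k) :
    (check stones k t = true ↔
      ∀ j : Nat, j + k.toNat ≤ stones.length → t ≤ pvW stones k.toNat j) := by
  rw [check, checkGo_iff t k stones k hk le_rfl]
  constructor
  · intro h j hj
    rw [pvW, ← window_eq stones k.toNat j hj,
        le_pvMaxL_iff _ (by
          have : ((stones.drop j).take k.toNat).length = k.toNat := by
            rw [List.length_take, List.length_drop]; omega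
          intro hnil; rw [hnil] at this; simp at this; omega)]
    by_contra hno
    push_neg at hno
    apply h
    rcases Nat.eq_zero_or_pos j with rfl | hj1
    · left
      simp only [List.drop_zero] at hno
      exact ⟨by omega, fun x hx => by have := hno x hx; omega⟩
    · right
      exact ⟨j, hj1, hj, fun x hx => by have := hno x hx; omega⟩
  · intro h hbad
    rcases hbad with ⟨hl, hall⟩ | ⟨j, _, hj2, hall⟩
    · have h0 := h 0 (by omega)
      rw [pvW, ← window_eq stones k.toNat 0 (by omega),
          le_pvMaxL_iff _ (by
            have : ((stones.drop 0).take k.toNat).length = k.toNat := by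
              rw [List.length_take, List.length_drop]; omega
            intro hnil; rw [hnil] at this; simp at this; omega)] at h0
      obtain ⟨x, hx, hxt⟩ := h0
      have := hall x (by simpa using hx)
      omega
    · have h0 := h j hj2
      rw [pvW, ← window_eq stones k.toNat j hj2,
          le_pvMaxL_iff _ (by
            have : ((stones.drop j).take k.toNat).length = k.toNat := by
              rw [List.length_take, List.length_drop]; omega
            intro hnil; rw [hnil] at this; simp at this; omega)] at h0
      obtain ⟨x, hx, hxt⟩ := h0
      have := hall x hx
      omega

theorem le_pvBmin_iff (stones : List Int) (K : Nat) (t : Int) :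
    ∀ u, (t ≤ pvBmin stones K u ↔ ∀ j ≤ u, t ≤ pvW stones K j) := by
  intro u
  induction u with
  | zero =>
    simp only [pvBmin]
    constructor
    · intro h j hj
      have hj0 : j = 0 := Nat.le_zero.mp hj
      subst hj0; exact h
    · intro h; exact h 0 le_rfl
  | succ u ih =>
    simp only [pvBmin, le_min_iff, ih]
    constructor
    · rintro ⟨h1, h2⟩ j hj
      rcases Nat.lt_or_ge j (u + 1) with h | h
      · exact h1 j (by omega)
      · have : j = u + 1 := by omega
        subst this; exact h2
    · intro h
      exact ⟨fun j hj => h j (by omega), h (u + 1) le_rfl⟩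

theorem check_eq (stones : List Int) (k t : Int) (hk : 1 ≤ k)
    (hlen : k.toNat ≤ stones.length) :
    check stones k t =
      decide (t ≤ pvBmin stones k.toNat (stones.length - k.toNat)) := by
  rcases h : check stones k t with _ | _
  · symm
    rw [decide_eq_false_iff_not]
    intro hle
    rw [le_pvBmin_iff] at hle
    have : check stones k t = true := by
      rw [check_char stones k t hk]
      intro j hj
      exact hle j (by omega)
    rw [h] at this; exact absurd this (by simp)
  · symm
    rw [decide_eq_true_eq, le_pvBmin_iff]
    intro j hj
    rw [check_char stones k t hk] at h
    exact h j (by omega)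

theorem check_all_true (stones : List Int) (k t : Int) (hk : 1 ≤ k)
    (hlen : stones.length < k.toNat) : check stones k t = true := by
  rw [check_char stones k t hk]
  intro j hj
  omega

-- ===== deque-side helpers =====

def pvLeadB (stones : List Int) (i j : Nat) : Bool :=
  decide (∀ j' < i, j < j' → pvVal stones j' < pvVal stones j)

def pvLive (stones : List Int) (K i : Nat) : List Nat :=
  (List.range' (i - K) (min i K)).filter (pvLeadB stones i)

def pvBestS (stones : List Int) (K i : Nat) : Option Int :=
  if i < K then none else some (pvBmin stones K (i - K))

def pvCastL (l : List Nat) : List Int := l.map (fun j => Int.ofNat j)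

theorem pvCastL_nil : pvCastL [] = [] := rfl

theorem pvCastL_cons (a : Nat) (l : List Nat) : pvCastL (a :: l) = (a : Int) :: pvCastL l := rfl

theorem pvCastL_append (l₁ l₂ : List Nat) : pvCastL (l₁ ++ l₂) = pvCastL l₁ ++ pvCastL l₂ := by
  simp [pvCastL]

def pvInv (stones : List Int) (K i : Nat) (st : List Int × Int × Option Int) : Prop :=
  (∃ D : List Int, st.1 = D ++ pvCastL (pvLive stones K i) ∧
      st.2.1 = (D.length : Int)) ∧
  st.2.2 = pvBestS stones K i

theorem popLoop_spec (stones : List Int) (s : Int) :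
    ∀ (L : List Nat) (D : List Int),
      L.Pairwise (fun a b => pvVal stones b < pvVal stones a) →
      popLoop stones s ((D.length : Int)) (D ++ pvCastL L) =
        D ++ pvCastL (L.filter (fun j => decide (s < pvVal stones j))) := by
  intro L
  induction L using List.reverseRecOn with
  | nil =>
    intro D _
    rw [pvCastL_nil, List.append_nil, popLoop]
    simp [pvCastL]
  | append_singleton L' a ih =>
    intro D hpw
    have hpw' : L'.Pairwise (fun a b => pvVal stones b < pvVal stones a) :=
      (List.pairwise_append.1 hpw).1
    have hgt : ∀ x ∈ L', pvVal stones a < pvVal stones x := by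
      intro x hx
      exact (List.pairwise_append.1 hpw).2.2 x hx a (by simp)
    have hsplit : D ++ pvCastL (L' ++ [a]) = (D ++ pvCastL L') ++ [(a : Int)] := by
      rw [pvCastL_append, pvCastL_cons, pvCastL_nil, ← List.append_assoc]
    rw [popLoop, hsplit]
    rw [PySem.List.pyGetD_neg_one_append_singleton, PySem.List.pyGetD_natCast]
    by_cases hva : stones.getD a 0 ≤ s
    · rw [dif_pos ⟨by positivity, by simp, hva⟩]
      rw [List.dropLast_concat]
      rw [ih D hpw']
      congr 2
      rw [List.filter_append]
      have hno : (decide (s < pvVal stones a)) = false := by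
        simp only [pvVal, decide_eq_false_iff_not]; omega
      simp [hno]
    · rw [dif_neg (by
        rintro ⟨_, _, hc⟩
        exact hva hc)]
      have hself : List.filter (fun j => decide (s < pvVal stones j)) (L' ++ [a]) = L' ++ [a] := by
        rw [List.filter_eq_self]
        intro x hx
        rcases List.mem_append.1 hx with hx' | hx'
        · have h1 := hgt x hx'
          simp only [pvVal] at h1 ⊢
          simp only [decide_eq_true_eq]
          omega
        · simp at hx'
          subst hx'
          simp only [pvVal, decide_eq_true_eq]
          omega
      rw [hself, hsplit]

-- the binary-search result (bsLoop followed by the final check), as one value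
def pvBsRes (stones : List Int) (k l r : Int) : Int :=
  let p := bsLoop stones k l r
  if check stones k p.2 then p.2 else p.1

theorem pvMidBounds (l r : Int) (h : l < r - 1) :
    l + 1 ≤ PySem.Int.floordiv (l + r) 2 ∧ PySem.Int.floordiv (l + r) 2 ≤ r - 1 := by
  constructor
  · exact (PySem.Int.le_floordiv_iff_mul_le (by omega)).2 (by omega)
  · have := (PySem.Int.floordiv_lt_iff_lt_mul (q := r) (a := l + r) (b := 2) (by omega)).2 (by omega)
    omega

theorem bsLoop_step_true (stones : List Int) (k l r : Int) (h : l < r - 1)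
    (hc : check stones k (PySem.Int.floordiv (l + r) 2) = true) :
    bsLoop stones k l r = bsLoop stones k (PySem.Int.floordiv (l + r) 2) r := by
  rw [bsLoop, if_pos h]
  show (if check stones k (PySem.Int.floordiv (l + r) 2) = true
        then bsLoop stones k (PySem.Int.floordiv (l + r) 2) r
        else bsLoop stones k l (PySem.Int.floordiv (l + r) 2)) = _
  rw [hc, if_pos rfl]

theorem bsLoop_step_false (stones : List Int) (k l r : Int) (h : l < r - 1)
    (hc : check stones k (PySem.Int.floordiv (l + r) 2) = false) :
    bsLoop stones k l r = bsLoop stones k l (PySem.Int.floordiv (l + r) 2) := by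
  rw [bsLoop, if_pos h]
  show (if check stones k (PySem.Int.floordiv (l + r) 2) = true
        then bsLoop stones k (PySem.Int.floordiv (l + r) 2) r
        else bsLoop stones k l (PySem.Int.floordiv (l + r) 2)) = _
  rw [hc]
  simp

theorem bsLoop_stop (stones : List Int) (k l r : Int) (h : ¬ l < r - 1) :
    bsLoop stones k l r = (l, r) := by
  rw [bsLoop, if_neg h]

theorem pvBsRes_high (stones : List Int) (k : Int)
    (hall : ∀ t, check stones k t = true) :
    ∀ m : Nat, ∀ l r : Int, (r - l).toNat ≤ m → l < r → pvBsRes stones k l r = r := by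
  intro m
  induction m with
  | zero => intro l r hm hlr; omega
  | succ m ih =>
    intro l r hm hlr
    by_cases h : l < r - 1
    · have hmid := pvMidBounds l r h
      rw [pvBsRes, bsLoop_step_true stones k l r h (hall _)]
      exact ih (PySem.Int.floordiv (l + r) 2) r (by omega) (by omega)
    · rw [pvBsRes, bsLoop_stop stones k l r h]
      simp [hall r]

theorem pvBsRes_low (stones : List Int) (k T : Int)
    (hchk : ∀ t, check stones k t = decide (t ≤ T)) :
    ∀ m : Nat, ∀ l r : Int, (r - l).toNat ≤ m → T < l → l < r → pvBsRes stones k l r = l := by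
  intro m
  induction m with
  | zero => intro l r hm hT hlr; omega
  | succ m ih =>
    intro l r hm hT hlr
    by_cases h : l < r - 1
    · have hmid := pvMidBounds l r h
      have hcf : check stones k (PySem.Int.floordiv (l + r) 2) = false := by
        rw [hchk]; simp only [decide_eq_false_iff_not]; omega
      rw [pvBsRes, bsLoop_step_false stones k l r h hcf]
      exact ih l (PySem.Int.floordiv (l + r) 2) (by omega) hT (by omega)
    · rw [pvBsRes, bsLoop_stop stones k l r h]
      have hcf : check stones k r = false := by
        rw [hchk]; simp only [decide_eq_false_iff_not]; omega
      simp [hcf]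

theorem pvBsRes_mid (stones : List Int) (k T : Int)
    (hchk : ∀ t, check stones k t = decide (t ≤ T)) :
    ∀ m : Nat, ∀ l r : Int, (r - l).toNat ≤ m → l ≤ T → l < r →
      pvBsRes stones k l r = min T r := by
  intro m
  induction m with
  | zero => intro l r hm hT hlr; omega
  | succ m ih =>
    intro l r hm hT hlr
    by_cases h : l < r - 1
    · have hmid := pvMidBounds l r h
      by_cases hm2 : PySem.Int.floordiv (l + r) 2 ≤ T
      · have hct : check stones k (PySem.Int.floordiv (l + r) 2) = true := by
          rw [hchk]; simp only [decide_eq_true_eq]; omega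
        rw [pvBsRes, bsLoop_step_true stones k l r h hct]
        exact ih (PySem.Int.floordiv (l + r) 2) r (by omega) hm2 (by omega)
      · have hcf : check stones k (PySem.Int.floordiv (l + r) 2) = false := by
          rw [hchk]; simp only [decide_eq_false_iff_not]; omega
        rw [pvBsRes, bsLoop_step_false stones k l r h hcf]
        have hrec := ih l (PySem.Int.floordiv (l + r) 2) (by omega) hT (by omega)
        rw [pvBsRes] at hrec
        rw [hrec]
        rw [min_eq_left (by omega : T ≤ PySem.Int.floordiv (l + r) 2),
            min_eq_left (by omega : T ≤ r)]
    · rw [pvBsRes, bsLoop_stop stones k l r h]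
      by_cases hrT : r ≤ T
      · have hct : check stones k r = true := by
          rw [hchk]; simp only [decide_eq_true_eq]; omega
        rw [min_eq_right (by omega : r ≤ T)]
        simp [hct]
      · have hcf : check stones k r = false := by
          rw [hchk]; simp only [decide_eq_false_iff_not]; omega
        simp only [hcf, Bool.false_eq_true, if_false]
        rw [min_eq_left (by omega : T ≤ r)]
        omega

theorem pvLive_mem (stones : List Int) (K i j : Nat) (hj : j ∈ pvLive stones K i) :
    i - K ≤ j ∧ j < i ∧ pvLeadB stones i j = true := by
  rcases List.mem_filter.1 hj with ⟨hr, hd⟩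
  rcases List.mem_range'_1.1 hr with ⟨h1, h2⟩
  exact ⟨h1, by omega, hd⟩

theorem pvPairwise_val (stones : List Int) (i : Nat) :
    ∀ (l : List Nat), l.Pairwise (· < ·) →
      (∀ j ∈ l, j < i ∧ pvLeadB stones i j = true) →
      l.Pairwise (fun a b => pvVal stones b < pvVal stones a) := by
  intro l
  induction l with
  | nil => intro _ _; exact List.Pairwise.nil
  | cons a t ih =>
    intro hpw hall
    rcases List.pairwise_cons.1 hpw with ⟨hlt, hpw'⟩
    refine List.pairwise_cons.2 ⟨?_, ih hpw' (fun j hj => hall j (List.mem_cons_of_mem _ hj))⟩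
    intro b hb
    have hd := (hall a (by simp)).2
    have hbi := (hall b (List.mem_cons_of_mem _ hb)).1
    rw [pvLeadB, decide_eq_true_eq] at hd
    exact hd b hbi (hlt b hb)

theorem pvLive_pairwise (stones : List Int) (K i : Nat) :
    (pvLive stones K i).Pairwise (fun a b => pvVal stones b < pvVal stones a) := by
  apply pvPairwise_val stones i
  · exact (List.pairwise_lt_range' 1).filter _
  · intro j hj
    have := pvLive_mem stones K i j hj
    exact ⟨this.2.1, this.2.2⟩

theorem pvLive_step (stones : List Int) (K i : Nat) :
    (pvLive stones K i).filter (fun j => decide (pvVal stones i < pvVal stones j)) ++ [i] =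
      (List.range' (i - K) (min i K + 1)).filter (pvLeadB stones (i + 1)) := by
  rw [pvLive, List.filter_filter]
  have h1 : (List.range' (i - K) (min i K)).filter
      (fun j => decide (pvVal stones i < pvVal stones j) && pvLeadB stones i j) =
      (List.range' (i - K) (min i K)).filter (pvLeadB stones (i + 1)) := by
    apply List.filter_congr
    intro j hj
    rcases List.mem_range'_1.1 hj with ⟨hj1, hj2⟩
    have hji : j < i := by omega
    rw [pvLeadB, pvLeadB, ← Bool.decide_and, decide_eq_decide]
    constructor
    · rintro ⟨hs, hd⟩ j' hj' hjj'
      rcases Nat.lt_or_ge j' i with h | h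
      · exact hd j' h hjj'
      · have : j' = i := by omega
        subst this; exact hs
    · intro h
      exact ⟨h i (by omega) hji, fun j' hj' hjj' => h j' (by omega) hjj'⟩
  rw [h1]
  have h2 : List.range' (i - K) (min i K + 1) = List.range' (i - K) (min i K) ++ [i] := by
    rw [List.range'_concat]
    congr 2
    omega
  rw [h2, List.filter_append]
  congr 1
  have : pvLeadB stones (i + 1) i = true := by
    rw [pvLeadB, decide_eq_true_eq]
    intro j' hj' hij'
    omega
  simp [this]

theorem pvFront_max (stones : List Int) :
    ∀ (m : Nat), 1 ≤ m → ∀ a : Nat,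
      ∃ j₀ L', (List.range' a m).filter (pvLeadB stones (a + m)) = j₀ :: L' ∧
        pvVal stones j₀ = pvMaxL ((List.range' a m).map (pvVal stones)) := by
  intro m
  induction m with
  | zero => intro h; omega
  | succ m ih =>
    intro _ a
    rcases Nat.eq_zero_or_pos m with rfl | hm
    · have hd : pvLeadB stones (a + 1) a = true := by
        rw [pvLeadB, decide_eq_true_eq]; intro j' h1 h2; omega
      refine ⟨a, [], ?_, ?_⟩
      · simp [hd]
      · simp [pvMaxL]
    · rw [List.range'_succ]
      have hshift : a + (m + 1) = (a + 1) + m := by omega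
      by_cases hd : pvLeadB stones (a + m + 1) a = true
      · refine ⟨a, (List.range' (a + 1) m).filter (pvLeadB stones (a + m + 1)), ?_, ?_⟩
        · rw [List.filter_cons]
          simp only [show a + (m + 1) = a + m + 1 from by omega] at *
          simp [hd]
        · rw [List.map_cons]
          rw [pvMaxL_cons_of_le]
          intro y hy
          rcases List.mem_map.1 hy with ⟨j, hj, rfl⟩
          rcases List.mem_range'_1.1 hj with ⟨h1, h2⟩
          rw [pvLeadB, decide_eq_true_eq] at hd
          exact le_of_lt (hd j (by omega) (by omega))
      · obtain ⟨j₀, L', heq, hval⟩ := ih hm (a + 1)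
        rw [show (a + 1) + m = a + m + 1 from by omega] at heq
        refine ⟨j₀, L', ?_, ?_⟩
        · rw [List.filter_cons]
          simp only [show a + (m + 1) = a + m + 1 from by omega] at *
          simp only [hd]
          simpa using heq
        · rw [List.map_cons]
          rw [pvLeadB, decide_eq_true_eq] at hd
          push_neg at hd
          obtain ⟨j', hj'1, hj'2, hj'3⟩ := hd
          have hj'mem : j' ∈ List.range' (a + 1) m := by
            rw [List.mem_range'_1]
            omega
          rw [pvMaxL_cons_of_mem _ _ (pvVal stones j') (List.mem_map_of_mem hj'mem) hj'3]
          exact hval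

theorem pvGetD_append_cons (D : List Int) (x : Int) (t : List Int) (d : Int) :
    PySem.List.pyGetD (D ++ x :: t) ((D.length : Int)) d = x := by
  rw [PySem.List.pyGetD_natCast]
  rw [List.getD_eq_getElem?_getD, List.getElem?_append_right le_rfl]
  simp

theorem pvInv_step (stones : List Int) (k : Int) (hk : 1 ≤ k) (i : Nat)
    (st : List Int × Int × Option Int) (h : pvInv stones k.toNat i st) :
    pvInv stones k.toNat (i + 1) (dqStep stones k st (i : Int)) := by
  obtain ⟨⟨D, hq, hh⟩, hb⟩ := h
  set K := k.toNat with hKdef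
  have hKk : (K : Int) = k := Int.toNat_of_nonneg (by omega)
  have hK1 : 1 ≤ K := by omega
  have hs : PySem.List.pyGetD stones (i : Int) 0 = pvVal stones i := by
    rw [PySem.List.pyGetD_natCast]; rfl
  set R : List Nat := (List.range' (i - K) (min i K + 1)).filter (pvLeadB stones (i + 1))
    with hRdef
  have hqR : popLoop stones (pvVal stones i) st.2.1 st.1 ++ [(i : Int)] =
      D ++ pvCastL R := by
    rw [hq, hh, popLoop_spec stones (pvVal stones i) _ D (pvLive_pairwise stones K i)]
    rw [List.append_assoc, hRdef, ← pvLive_step, pvCastL_append, pvCastL_cons, pvCastL_nil]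
  have hRne : R ≠ [] := by
    rw [hRdef, ← pvLive_step]
    simp
  simp only [dqStep, hs, hqR]
  obtain ⟨r₀, R', hRc⟩ : ∃ a l, R = a :: l := by
    rcases hR0 : R with _ | ⟨a, l⟩
    · exact absurd hR0 hRne
    · exact ⟨a, l, rfl⟩
  have hfront : PySem.List.pyGetD (D ++ pvCastL R) st.2.1 0 = (r₀ : Int) := by
    rw [hh, hRc, pvCastL_cons, pvGetD_append_cons]
  have hr₀R : r₀ ∈ R := by rw [hRc]; simp
  have hr₀lo : i - K ≤ r₀ ∧ r₀ < i + 1 := by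
    rcases List.mem_filter.1 (hRdef ▸ hr₀R) with ⟨hr, _⟩
    rcases List.mem_range'_1.1 hr with ⟨h1, h2⟩
    exact ⟨h1, by omega⟩
  by_cases hiK : i < K
  · -- window not yet full: no expiry, live(i+1) = R
    have hlive : pvLive stones K (i + 1) = R := by
      rw [pvLive, hRdef, show i + 1 - K = i - K from by omega,
          show min (i + 1) K = min i K + 1 from by omega]
    have hnoexp : ¬ ((r₀ : Int) ≤ (i : Int) - k) := by
      rw [← hKk]
      have h1 : (0 : Int) ≤ (r₀ : Int) := Int.natCast_nonneg r₀
      omega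
    rw [hfront, if_neg hnoexp]
    refine ⟨⟨D, by rw [hlive], hh⟩, ?_⟩
    by_cases hKi : k - 1 ≤ (i : Int)
    · have hKi' : K = i + 1 := by
        have h2 : (K : Int) - 1 ≤ (i : Int) := by rw [hKk]; exact hKi
        have h3 : i < K := hiK
        omega
      rw [if_pos hKi]
      obtain ⟨j₀, L'', heq, hval⟩ := pvFront_max stones (min i K + 1) (by omega) (i - K)
      have heqR : R = j₀ :: L'' := by
        rw [hRdef, ← heq]
        congr 2
        omega
      have hj₀ : r₀ = j₀ := by
        rw [hRc] at heqR
        exact (List.cons_eq_cons.1 heqR).1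
      rw [hfront, PySem.List.pyGetD_natCast]
      rw [hb, pvBestS, if_pos hiK]
      rw [pvBestS, if_neg (by omega)]
      dsimp only
      have hW : pvBmin stones K (i + 1 - K) = pvW stones K 0 := by
        rw [show i + 1 - K = 0 from by omega]
        rfl
      rw [hW, pvW]
      have hgd : stones.getD r₀ 0 = pvVal stones r₀ := rfl
      rw [hgd, hj₀, hval]
      have hrw : i - K = 0 := by omega
      have hrw2 : min i K + 1 = K := by omega
      rw [hrw, hrw2]
    · rw [if_neg hKi]
      rw [hb, pvBestS, if_pos hiK, pvBestS, if_pos (by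
        have h2 : ¬ ((K : Int) - 1 ≤ (i : Int)) := by rw [hKk]; exact hKi
        omega)]
  · -- full window: K ≤ i
    have hiK' : K ≤ i := by omega
    have hsplit : List.range' (i - K) (min i K + 1) = (i - K) :: List.range' (i - K + 1) K := by
      rw [show min i K + 1 = K + 1 from by omega, List.range'_succ]
    have hlive : pvLive stones K (i + 1) =
        (List.range' (i - K + 1) K).filter (pvLeadB stones (i + 1)) := by
      rw [pvLive]
      congr 2
      · omega
      · omega
    obtain ⟨j₀, L'', heq, hval⟩ := pvFront_max stones K hK1 (i - K + 1)
    rw [show i - K + 1 + K = i + 1 from by omega] at heq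
    have hT : pvLive stones K (i + 1) = j₀ :: L'' := by rw [hlive, heq]
    have hWj : pvVal stones j₀ = pvW stones K (i + 1 - K) := by
      rw [hval, pvW, show i + 1 - K = i - K + 1 from by omega]
    have hj₀mem : j₀ ∈ List.range' (i - K + 1) K := by
      have hmem : j₀ ∈ (List.range' (i - K + 1) K).filter (pvLeadB stones (i + 1)) := by
        rw [heq]; simp
      exact List.mem_of_mem_filter hmem
    have hj₀lo : i - K + 1 ≤ j₀ := (List.mem_range'_1.1 hj₀mem).1
    have hbest : st.2.2 = some (pvBmin stones K (i - K)) := by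
      rw [hb, pvBestS, if_neg (by omega)]
    have hbmin : pvBmin stones K (i + 1 - K) =
        min (pvBmin stones K (i - K)) (pvW stones K (i + 1 - K)) := by
      rw [show i + 1 - K = (i - K) + 1 from by omega]
      rw [pvBmin]
    have hcast : ((i - K : Nat) : Int) = (i : Int) - k := by
      rw [← hKk]
      omega
    by_cases hd : pvLeadB stones (i + 1) (i - K) = true
    · -- the leaving index i-K is on the deque front and expires
      have hRsplit : R = (i - K) :: (j₀ :: L'') := by
        rw [hRdef, hsplit, List.filter_cons, if_pos hd, ← heq]
      have hr₀ : r₀ = i - K := by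
        rw [hRc] at hRsplit
        exact (List.cons_eq_cons.1 hRsplit).1
      have hexp : (r₀ : Int) ≤ (i : Int) - k := by
        rw [hr₀, hcast]
      rw [hfront, if_pos hexp]
      have hq2 : D ++ pvCastL R =
          (D ++ [((i - K : Nat) : Int)]) ++ pvCastL (pvLive stones K (i + 1)) := by
        rw [hRsplit, hT, pvCastL_cons, List.append_assoc]
        rfl
      refine ⟨⟨D ++ [((i - K : Nat) : Int)], hq2, by rw [hh]; simp⟩, ?_⟩
      rw [if_pos (show k - 1 ≤ (i : Int) by rw [← hKk]; omega)]
      rw [hq2]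
      have hlen : st.2.1 + 1 = (((D ++ [((i - K : Nat) : Int)]).length : Nat) : Int) := by
        rw [hh]; simp
      rw [hlen, hT, pvCastL_cons, pvGetD_append_cons, PySem.List.pyGetD_natCast]
      rw [hbest, pvBestS, if_neg (by omega), hbmin]
      dsimp only
      have hgd : stones.getD j₀ 0 = pvVal stones j₀ := rfl
      rw [hgd, hWj]
      rcases lt_or_ge (pvW stones K (i + 1 - K)) (pvBmin stones K (i - K)) with hlt | hge
      · rw [if_pos hlt, min_eq_right (le_of_lt hlt)]
      · rw [if_neg (by omega), min_eq_left hge]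
    · -- the leaving index is not on the deque: no expiry
      have hRT : R = j₀ :: L'' := by
        rw [hRdef, hsplit, List.filter_cons, if_neg (by simp [hd]), ← heq]
      have hr₀ : r₀ = j₀ := by
        rw [hRc] at hRT
        exact (List.cons_eq_cons.1 hRT).1
      have hnoexp : ¬ ((r₀ : Int) ≤ (i : Int) - k) := by
        rw [← hKk]
        have h2 : (i - K : Nat) < r₀ := by omega
        omega
      rw [hfront, if_neg hnoexp]
      refine ⟨⟨D, by rw [hRT, ← hT], hh⟩, ?_⟩
      rw [if_pos (show k - 1 ≤ (i : Int) by rw [← hKk]; omega)]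
      rw [hfront, PySem.List.pyGetD_natCast]
      rw [hbest, pvBestS, if_neg (by omega), hbmin]
      dsimp only
      have hgd : stones.getD r₀ 0 = pvVal stones r₀ := rfl
      rw [hgd, hr₀, hWj]
      rcases lt_or_ge (pvW stones K (i + 1 - K)) (pvBmin stones K (i - K)) with hlt | hge
      · rw [if_pos hlt, min_eq_right (le_of_lt hlt)]
      · rw [if_neg (by omega), min_eq_left hge]

theorem pvInv_fold (stones : List Int) (k : Int) (hk : 1 ≤ k) :
    ∀ i : Nat, pvInv stones k.toNat i
      ((pvCastL (List.range i)).foldl (dqStep stones k) ([], 0, none)) := by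
  intro i
  induction i with
  | zero =>
    rw [List.range_zero, pvCastL_nil]
    constructor
    · exact ⟨[], by simp [pvLive, pvCastL], rfl⟩
    · show (none : Option Int) = pvBestS stones k.toNat 0
      rw [pvBestS, if_pos (by omega)]
  | succ i ih =>
    rw [List.range_succ, pvCastL_append, List.foldl_append, pvCastL_cons, pvCastL_nil,
        List.foldl_cons, List.foldl_nil]
    exact pvInv_step stones k hk i _ ih

theorem pvAlt_eq (stones : List Int) (k : Int) (hk : 1 ≤ k)
    (hlen : k ≤ (stones.length : Int)) :
    solution_alt stones k =
      max 0 (min (pvBmin stones k.toNat (stones.length - k.toNat)) 200000000) := by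
  unfold solution_alt
  rw [if_neg (by omega)]
  rw [PySem.List.pyRange_zero_natCast]
  obtain ⟨_, hbest⟩ := pvInv_fold stones k hk stones.length
  have hbest' : (List.foldl (dqStep stones k) ([], 0, none)
      (List.map (fun j : Nat => (j : Int)) (List.range stones.length))).2.2 =
      pvBestS stones k.toNat stones.length := by exact hbest
  show max 0 (min ((List.foldl (dqStep stones k) ([], 0, none)
      (List.map (fun j : Nat => (j : Int)) (List.range stones.length))).2.2.getD 0) 200000000) = _
  rw [hbest', pvBestS, if_neg (by omega)]
  rfl

theorem solution_eq_bsres (stones : List Int) (k : Int) :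
    solution stones k = pvBsRes stones k 0 200000000 := rfl

-- ===== VERDICT (by name: the statement is the Claim_ definition above) =====
theorem solution_spec : Claim_equal_solution := by
  unfold Claim_equal_solution
  intro stones k _ hpre
  unfold Spec_solution
  have hk1 : (1 : Int) ≤ k := hpre
  by_cases hbig : (stones.length : Int) < k
  · have hall : ∀ t, check stones k t = true := fun t =>
      check_all_true stones k t hk1 (by omega)
    have hres : pvBsRes stones k 0 200000000 = 200000000 :=
      pvBsRes_high stones k hall 200000000 0 200000000 (by norm_num) (by norm_num)
    rw [solution_eq_bsres, hres]
    unfold solution_alt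
    rw [if_pos (by omega)]
  · have hKn : k.toNat ≤ stones.length := by omega
    set T := pvBmin stones k.toNat (stones.length - k.toNat) with hT
    have hchk : ∀ t, check stones k t = decide (t ≤ T) := fun t =>
      check_eq stones k t hk1 hKn
    rw [solution_eq_bsres, pvAlt_eq stones k hk1 (by omega)]
    rcases lt_or_ge T 0 with h0 | h0
    · rw [pvBsRes_low stones k T hchk 200000000 0 200000000 (by norm_num) h0 (by norm_num)]
      rw [min_eq_left (by omega), max_eq_left (by omega)]
    · rw [pvBsRes_mid stones k T hchk 200000000 0 200000000 (by norm_num) h0 (by norm_num)]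
      rw [max_eq_right (le_min h0 (by norm_num))]
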